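-- pv_equiv track=rewrite | github.com/smartdanny/hrdl | src/data_stuff/NEW_patch_dataset.py | group_dataset
-- ===== SOURCE A (Python) =====
-- from itertools import zip_longest
--
-- def group_dataset(dataset_dict, group_size):
--     """
--     Take the dataset_dict made in make_dataset and split based on group_size.
--
--     Inputs:
--         dataset_dict: formatted dataset from self.make_dataset()
--         group_size: number of patches per image_id
--
--     Returns:
--         grouped_dataset: list where each index is a sample that will be returned from __getitem__
--                         each index follows: (image_id, [list_of_images_with_len_group_size], label )
--     """
--     grouped_dataset = []
--     for image_id in dataset_dict.keys():
--         patches_list, label = dataset_dict[image_id]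
--         #https://stackoverflow.com/questions/1624883/alternative-way-to-split-a-list-into-groups-of-n
--         grouped_list = list(zip_longest(*(iter(patches_list),) * group_size))
--         for image_list in grouped_list:
--             if None not in image_list:
--                 individual_sample = (image_id, ",".join(image_list), label)
--                 grouped_dataset.append(individual_sample)
--     return grouped_dataset
-- ===== SOURCE B (Python) =====
-- def group_dataset(dataset_dict, group_size):
--     grouped_dataset = []
--     for image_id, (patches_list, label) in dataset_dict.items():
--         if group_size > 0:
--             complete = len(patches_list) // group_size
--             for i in range(complete):
--                 chunk = patches_list[i * group_size:(i + 1) * group_size]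
--                 grouped_dataset.append((image_id, ",".join(chunk), label))
--     return grouped_dataset
-- ===== Notes on version B (the rewrite author's own statement) =====
-- stated objective: simpler
-- what changed: Replaced the zip_longest(*(iter(xs),)*n) grouper with None padding and a None-membership filter by computing the number of complete groups with integer division and slicing each complete chunk directly, so no padded tuples or sentinel filtering exist and no per-image work proportional to group_size is done.
import Mathlib
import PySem

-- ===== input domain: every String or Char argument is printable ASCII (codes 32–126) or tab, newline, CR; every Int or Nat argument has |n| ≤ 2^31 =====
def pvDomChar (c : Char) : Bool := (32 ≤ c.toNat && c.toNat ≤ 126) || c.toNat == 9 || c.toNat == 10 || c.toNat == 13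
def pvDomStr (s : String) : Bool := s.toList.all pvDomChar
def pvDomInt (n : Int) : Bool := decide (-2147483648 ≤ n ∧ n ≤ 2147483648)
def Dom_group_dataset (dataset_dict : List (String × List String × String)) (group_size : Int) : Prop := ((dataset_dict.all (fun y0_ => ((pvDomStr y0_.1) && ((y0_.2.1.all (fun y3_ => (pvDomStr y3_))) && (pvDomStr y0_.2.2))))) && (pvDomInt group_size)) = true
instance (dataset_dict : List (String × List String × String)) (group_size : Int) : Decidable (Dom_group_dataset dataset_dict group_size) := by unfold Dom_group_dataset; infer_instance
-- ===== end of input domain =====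

-- B replaces A's zip_longest/None-pad/filter grouping with direct slicing of the complete chunks (objective: simpler).

-- ===== PORT A =====
-- list(zip_longest(*(iter(xs),) * n)) for n ≥ 1: chunks of n, last padded with None
def zlChunks : List String → Nat → List (List (Option String))
  | [], _ => []
  | _ :: _, 0 => []
  | x :: rest, n + 1 =>
      (((x :: rest).take (n + 1)).map some ++ List.replicate (n - rest.length) none)
        :: zlChunks (rest.drop n) (n + 1)
termination_by xs _ => xs.length
decreasing_by simp

def group_dataset (dataset_dict : List (String × List String × String)) (group_size : Int) : List (String × String × String) :=
  (PySem.Dict.ofList dataset_dict).keys.foldl (fun grouped_dataset image_id =>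
    match (PySem.Dict.ofList dataset_dict).get? image_id with
    | none => grouped_dataset  -- unreachable: image_id comes from d.keys
    | some (patches_list, label) =>
      -- zip_longest with 0 (or a negative number of) iterator copies yields []
      (if group_size ≤ 0 then [] else zlChunks patches_list group_size.toNat).foldl (fun acc image_list =>
        if !image_list.contains none then
          acc ++ [(image_id, PySem.Str.join "," (image_list.map (fun o => o.getD "")), label)]
        else acc) grouped_dataset) []

-- ===== PORT B =====
def group_dataset_alt (dataset_dict : List (String × List String × String)) (group_size : Int) : List (String × String × String) :=
  (PySem.Dict.ofList dataset_dict).items.foldl (fun grouped_dataset p =>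
    -- p is (image_id, (patches_list, label))
    if 0 < group_size then
      (PySem.List.pyRange 0 (PySem.Int.floordiv (p.2.1.length : Int) group_size) 1).foldl (fun acc i =>
        acc ++ [(p.1,
                 PySem.Str.join "," (PySem.List.slice p.2.1 (some (i * group_size)) (some ((i + 1) * group_size))),
                 p.2.2)]) grouped_dataset
    else grouped_dataset) []

-- ===== PRECONDITION & SPEC =====
def Spec_group_dataset (dataset_dict : List (String × List String × String)) (group_size : Int) (out : List (String × String × String)) : Prop := out = group_dataset_alt dataset_dict group_size
instance (dataset_dict : List (String × List String × String)) (group_size : Int) (out : List (String × String × String)) : Decidable (Spec_group_dataset dataset_dict group_size out) := by unfold Spec_group_dataset; infer_instance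

-- ===== CLAIM (what is proved, stated in full; the proofs are below) =====
def Claim_equal_group_dataset : Prop := ∀ (dataset_dict : List (String × List String × String)) (group_size : Int), Dom_group_dataset dataset_dict group_size → Spec_group_dataset dataset_dict group_size (group_dataset dataset_dict group_size)

-- ===== LEMMAS AND PROOFS =====

-- the complete chunks of size n (the common value both inner loops produce)
def completeChunks (xs : List String) (n : Nat) : List (List String) :=
  if _h : n = 0 ∨ xs.length < n then [] else xs.take n :: completeChunks (xs.drop n) n
termination_by xs.length
decreasing_by simp; omega

theorem filter_zlChunks (xs : List String) (n : Nat) (hn : 0 < n) :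
    (zlChunks xs n).filter (fun il => !il.contains none) = (completeChunks xs n).map (List.map some) := by
  induction xs, n using zlChunks.induct with
  | case1 n => rw [completeChunks]; simp [zlChunks]
  | case2 x rest => omega
  | case3 x rest n ih =>
      rw [zlChunks]
      by_cases hlen : rest.length < n
      · have hdrop : rest.drop n = [] := List.drop_eq_nil_of_le (by omega)
        rw [completeChunks, dif_pos (by simp; omega)]
        simp [hdrop, zlChunks, List.contains_eq_mem, List.mem_replicate]
        omega
      · have hrep : n - rest.length = 0 := by omega
        rw [completeChunks, dif_neg (by simp; omega)]
        simp only [hrep, List.replicate_zero, List.append_nil, List.filter_cons, List.map_cons]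
        have hnone : (((x :: rest).take (n + 1)).map some).contains (none : Option String) = false := by
          simp only [List.contains_eq_mem, decide_eq_false_iff_not]
          intro hmem
          obtain ⟨a, -, ha⟩ := List.mem_map.1 hmem
          cases ha
        rw [hnone]
        simp only [Bool.not_false, List.drop_succ_cons]
        rw [ih hn]; simp

theorem map_slice_eq_completeChunks (xs : List String) (n : Nat) (hn : 0 < n) :
    (List.range (xs.length / n)).map (fun i => (xs.drop (i * n)).take n) = completeChunks xs n := by
  refine completeChunks.induct n
    (motive := fun ys => (List.range (ys.length / n)).map (fun i => (ys.drop (i * n)).take n)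
      = completeChunks ys n) ?_ ?_ xs
  · intro xs h
    rw [completeChunks, dif_pos h]
    have hd : xs.length / n = 0 := Nat.div_eq_of_lt (by rcases h with h | h <;> omega)
    simp [hd]
  · intro xs h ih
    have hge : n ≤ xs.length := by rcases not_or.1 h with ⟨h1, h2⟩; omega
    rw [completeChunks, dif_neg h]
    have hdiv : xs.length / n = (xs.length - n) / n + 1 := Nat.div_eq_sub_div (by omega) hge
    have hih := ih
    rw [List.length_drop] at hih
    rw [hdiv, List.range_succ_eq_map, List.map_cons, List.map_map, ← hih]
    congr 1
    · simp
    · refine List.map_congr_left (fun i _ => ?_)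
      simp only [Function.comp_apply, List.drop_drop]
      congr 2
      rw [Nat.succ_mul, Nat.add_comm, Nat.mul_comm]


theorem entry_eq (id lab : String) (pl : List String) (gs : Int)
    (acc : List (String × String × String)) :
    (if gs ≤ 0 then [] else zlChunks pl gs.toNat).foldl (fun a il =>
        if !il.contains none then
          a ++ [(id, PySem.Str.join "," (il.map (fun o => o.getD "")), lab)]
        else a) acc
    = if 0 < gs then
        (PySem.List.pyRange 0 (PySem.Int.floordiv (pl.length : Int) gs) 1).foldl (fun a i =>
          a ++ [(id, PySem.Str.join "," (PySem.List.slice pl (some (i * gs)) (some ((i + 1) * gs))), lab)]) acc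
      else acc := by
  by_cases hgs : gs ≤ 0
  · rw [if_pos hgs, if_neg (by omega)]
    rfl
  · have hpos : 0 < gs := by omega
    have hn : 0 < gs.toNat := by omega
    rw [if_neg hgs, if_pos hpos]
    rw [PySem.List.foldl_append_if, filter_zlChunks pl gs.toNat hn]
    rw [PySem.List.foldl_append_singleton_eq_map]
    have hgsn : gs = (gs.toNat : Int) := (Int.toNat_of_nonneg (le_of_lt hpos)).symm
    rw [hgsn, PySem.Int.floordiv_natCast, PySem.List.pyRange_zero_natCast]
    simp only [Int.toNat_natCast]
    rw [List.map_map, List.map_map]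
    congr 1
    rw [← map_slice_eq_completeChunks pl gs.toNat hn, List.map_map]
    refine List.map_congr_left (fun i _ => ?_)
    simp only [Function.comp_apply]
    have h1 : (i : Int) * (gs.toNat : Int) = ((i * gs.toNat : Nat) : Int) := by push_cast; ring
    have h2 : ((i : Int) + 1) * (gs.toNat : Int) = (((i + 1) * gs.toNat : Nat) : Int) := by push_cast; ring
    rw [h1, h2, PySem.List.slice_natCast]
    have h3 : (i + 1) * gs.toNat - i * gs.toNat = gs.toNat := by
      rw [Nat.succ_mul]; omega
    rw [h3]
    congr 1
    simp [List.map_map, Function.comp_def]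

theorem main_fold (d : PySem.Dict String (List String × String)) (gs : Int)
    (l : List (String × List String × String))
    (h : ∀ p ∈ l, d.get? p.1 = some p.2) (acc : List (String × String × String)) :
    (l.map (·.1)).foldl (fun grouped_dataset image_id =>
      match d.get? image_id with
      | none => grouped_dataset
      | some (patches_list, label) =>
        (if gs ≤ 0 then [] else zlChunks patches_list gs.toNat).foldl (fun acc2 image_list =>
          if !image_list.contains none then
            acc2 ++ [(image_id, PySem.Str.join "," (image_list.map (fun o => o.getD "")), label)]
          else acc2) grouped_dataset) acc
    = l.foldl (fun grouped_dataset p =>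
        if 0 < gs then
          (PySem.List.pyRange 0 (PySem.Int.floordiv (p.2.1.length : Int) gs) 1).foldl (fun a i =>
            a ++ [(p.1,
                   PySem.Str.join "," (PySem.List.slice p.2.1 (some (i * gs)) (some ((i + 1) * gs))),
                   p.2.2)]) grouped_dataset
        else grouped_dataset) acc := by
  induction l generalizing acc with
  | nil => rfl
  | cons p t ih =>
      obtain ⟨k, pl, lab⟩ := p
      have hk : d.get? k = some (pl, lab) := h (k, pl, lab) (by simp)
      simp only [List.map_cons, List.foldl_cons, hk]
      rw [entry_eq k lab pl gs acc]
      exact ih (fun q hq => h q (by simp [hq])) _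

-- ===== VERDICT (by name: the statement is the Claim_ definition above) =====
theorem group_dataset_spec : Claim_equal_group_dataset := by
  intro dd gs _
  show group_dataset dd gs = group_dataset_alt dd gs
  unfold group_dataset group_dataset_alt
  rw [show (PySem.Dict.ofList dd).keys = (PySem.Dict.ofList dd).items.map (·.1) from rfl]
  exact main_fold (PySem.Dict.ofList dd) gs (PySem.Dict.ofList dd).items
    (fun p hp => PySem.Dict.get?_of_mem_items _ (by cases p; exact hp) (PySem.Dict.nodup_keys_ofList dd)) []
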